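-- pv_equiv track=rewrite | github.com/waifuai/ai-benchmarks | benchmarks/maze/evaluator.py | find_all_positions
-- ===== SOURCE A (Python) =====
-- from typing import List, Tuple, Dict, Set, Optional
--
-- def find_all_positions(grid: List[str], targets: Set[str]) -> Dict[str, List[Tuple[int, int]]]:
--     """Find all positions of target characters in the grid."""
--     positions = {}
--     for target in targets:
--         positions[target] = []
--
--     for i, row in enumerate(grid):
--         for j, char in enumerate(row):
--             if char in targets:
--                 positions[char].append((i, j))
--
--     return positions
-- ===== SOURCE B (Python) =====
-- from typing import List, Tuple, Dict, Set, Optional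
--
-- def find_all_positions(grid: List[str], targets: Set[str]) -> Dict[str, List[Tuple[int, int]]]:
--     """Find all positions of target characters in the grid: one row-major
--     scan of the grid per target, as a dict comprehension."""
--     return {t: [(i, j)
--                 for i, row in enumerate(grid)
--                 for j, c in enumerate(row)
--                 if c == t]
--             for t in targets}
-- ===== Notes on version B (the rewrite author's own statement) =====
-- stated objective: alternative
-- what changed: A builds every target's empty list first and classifies each grid cell into the right bucket in a single pass using a membership test; B has no mutable accumulator and no membership test: it loops over the targets on the outside and, for each target, scans the whole grid collecting that target's matching (i,j) positions directly, as a dict comprehension.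
import Mathlib
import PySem

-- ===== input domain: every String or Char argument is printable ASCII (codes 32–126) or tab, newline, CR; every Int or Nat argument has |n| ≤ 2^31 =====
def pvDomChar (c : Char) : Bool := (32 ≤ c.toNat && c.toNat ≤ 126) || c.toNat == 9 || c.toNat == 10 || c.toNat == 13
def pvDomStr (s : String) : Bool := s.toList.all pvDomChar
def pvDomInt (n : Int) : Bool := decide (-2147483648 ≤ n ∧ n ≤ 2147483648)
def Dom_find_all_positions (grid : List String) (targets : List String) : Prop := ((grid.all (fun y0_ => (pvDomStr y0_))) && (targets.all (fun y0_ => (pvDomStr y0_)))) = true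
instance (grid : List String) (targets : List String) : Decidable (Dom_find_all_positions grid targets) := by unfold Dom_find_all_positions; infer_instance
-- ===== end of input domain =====

-- B replaces A's single classify-each-cell-into-its-bucket pass by an outer loop over the
-- targets with a full grid scan per target (objective: alternative decomposition, same result).

-- ===== PORT A =====
-- positions[char].append(..) is ported as Dict.modify with default []; the key always exists
-- here (char ∈ targets and every target was inserted first), so this is exact.
def find_all_positions (grid : List String) (targets : List String) : List (String × List (Int × Int)) :=
  let positions : PySem.Dict String (List (Int × Int)) :=
    targets.foldl (fun d target => d.insert target []) PySem.Dict.empty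
  let positions :=
    (PySem.List.enumerate grid).foldl
      (fun d p =>
        (PySem.List.enumerate p.2.toList).foldl
          (fun d q =>
            if targets.contains (String.mk [q.2]) then
              d.modify (String.mk [q.2]) [] (· ++ [(p.1, q.1)])
            else d) d)
      positions
  positions.items

-- ===== PORT B =====
-- the inner comprehension of Source B: row-major positions of t in the grid
def pvScanB (grid : List String) (t : String) : List (Int × Int) :=
  (PySem.List.enumerate grid).flatMap (fun p =>
    ((PySem.List.enumerate p.2.toList).filter (fun q => String.mk [q.2] == t)).map
      (fun q => (p.1, q.1)))

def find_all_positions_alt (grid : List String) (targets : List String) : List (String × List (Int × Int)) :=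
  (targets.foldl (fun d t => d.insert t (pvScanB grid t)) PySem.Dict.empty).items

-- ===== PRECONDITION & SPEC =====
def Spec_find_all_positions (grid : List String) (targets : List String) (out : List (String × List (Int × Int))) : Prop := out = find_all_positions_alt grid targets
instance (grid : List String) (targets : List String) (out : List (String × List (Int × Int))) : Decidable (Spec_find_all_positions grid targets out) := by unfold Spec_find_all_positions; infer_instance

-- ===== CLAIM (what is proved, stated in full; the proofs are below) =====
def Claim_equal_find_all_positions : Prop := ∀ (grid : List String) (targets : List String), Dom_find_all_positions grid targets → Spec_find_all_positions grid targets (find_all_positions grid targets)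

-- ===== LEMMAS AND PROOFS =====

-- A's phase-1 dict: every key of interest is present, every value is []
theorem pvA_init_getD (targets : List String) (t : String) :
    (targets.foldl (fun d target => d.insert target []) (PySem.Dict.empty : PySem.Dict String (List (Int × Int)))).getD t [] = [] := by
  suffices h : ∀ (d : PySem.Dict String (List (Int × Int))), (∀ s, d.getD s [] = []) →
      (targets.foldl (fun d target => d.insert target []) d).getD t [] = [] by
    exact h _ (fun s => PySem.Dict.getD_empty _ _)
  induction targets with
  | nil => intro d hd; exact hd t
  | cons a ts ih =>
    intro d hd
    refine ih _ (fun s => ?_)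
    rw [PySem.Dict.getD_insert]
    split <;> simp [hd]

-- invariant "every target is a key" is preserved by A's inner (per-row) loop, and the key set is unchanged
theorem pvA_inner_keys (targets : List String) (qs : List (Int × Char)) (i : Int) :
    ∀ (d : PySem.Dict String (List (Int × Int))),
      (∀ s, targets.contains s = true → d.contains s = true) →
      (qs.foldl (fun d q =>
          if targets.contains (String.mk [q.2]) then
            d.modify (String.mk [q.2]) [] (· ++ [(i, q.1)])
          else d) d).keys = d.keys := by
  induction qs with
  | nil => intro d _; rfl
  | cons q qs ih =>
    intro d hd
    simp only [List.foldl_cons]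
    by_cases hq : targets.contains (String.mk [q.2]) = true
    · rw [if_pos hq]
      have hc : d.contains (String.mk [q.2]) = true := hd _ hq
      have hkeys : (d.modify (String.mk [q.2]) [] (· ++ [(i, q.1)])).keys = d.keys := by
        rw [PySem.Dict.keys_modify, PySem.Dict.keys_insert_of_contains _ _ hc]
      rw [ih _ (fun s hs => ?_), hkeys]
      rw [PySem.Dict.contains_iff_mem_keys, hkeys, ← PySem.Dict.contains_iff_mem_keys]
      exact hd s hs
    · rw [if_neg hq]; exact ih _ hd

-- same for the outer (per-grid) loop
theorem pvA_outer_keys (targets : List String) (ps : List (Int × String)) :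
    ∀ (d : PySem.Dict String (List (Int × Int))),
      (∀ s, targets.contains s = true → d.contains s = true) →
      (ps.foldl (fun d p =>
          (PySem.List.enumerate p.2.toList).foldl
            (fun d q =>
              if targets.contains (String.mk [q.2]) then
                d.modify (String.mk [q.2]) [] (· ++ [(p.1, q.1)])
              else d) d) d).keys = d.keys := by
  induction ps with
  | nil => intro d _; rfl
  | cons p ps ih =>
    intro d hd
    simp only [List.foldl_cons]
    have h1 := pvA_inner_keys targets (PySem.List.enumerate p.2.toList) p.1 d hd
    rw [ih _ (fun s hs => ?_), h1]
    rw [PySem.Dict.contains_iff_mem_keys, h1, ← PySem.Dict.contains_iff_mem_keys]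
    exact hd s hs

-- value accumulated by A's inner loop at a key t ∈ targets
theorem pvA_inner_getD (targets : List String) (qs : List (Int × Char)) (i : Int)
    (t : String) (ht : targets.contains t = true) :
    ∀ (d : PySem.Dict String (List (Int × Int))),
      (qs.foldl (fun d q =>
          if targets.contains (String.mk [q.2]) then
            d.modify (String.mk [q.2]) [] (· ++ [(i, q.1)])
          else d) d).getD t []
        = d.getD t [] ++ (qs.filter (fun q => String.mk [q.2] == t)).map (fun q => (i, q.1)) := by
  induction qs with
  | nil => intro d; simp
  | cons q qs ih =>
    intro d
    simp only [List.foldl_cons, List.filter_cons]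
    by_cases he : String.mk [q.2] = t
    · have hq : targets.contains (String.mk [q.2]) = true := by rw [he]; exact ht
      rw [if_pos hq, ih]
      have : (String.mk [q.2] == t) = true := by simp [he]
      rw [this]
      simp only [List.map_cons]
      rw [PySem.Dict.getD_modify, if_pos he.symm, he]
      simp
    · have : (String.mk [q.2] == t) = false := by simp [he]
      rw [this]
      by_cases hq : targets.contains (String.mk [q.2]) = true
      · rw [if_pos hq, ih, PySem.Dict.getD_modify, if_neg (fun h => he h.symm)]
        simp
      · rw [if_neg hq, ih]
        simp
  
-- value accumulated by A's outer loop at a key t ∈ targets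
theorem pvA_outer_getD (targets : List String) (ps : List (Int × String))
    (t : String) (ht : targets.contains t = true) :
    ∀ (d : PySem.Dict String (List (Int × Int))),
      (ps.foldl (fun d p =>
          (PySem.List.enumerate p.2.toList).foldl
            (fun d q =>
              if targets.contains (String.mk [q.2]) then
                d.modify (String.mk [q.2]) [] (· ++ [(p.1, q.1)])
              else d) d) d).getD t []
        = d.getD t [] ++ ps.flatMap (fun p =>
            ((PySem.List.enumerate p.2.toList).filter (fun q => String.mk [q.2] == t)).map
              (fun q => (p.1, q.1))) := by
  induction ps with
  | nil => intro d; simp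
  | cons p ps ih =>
    intro d
    simp only [List.foldl_cons, List.flatMap_cons]
    rw [ih, pvA_inner_getD targets _ p.1 t ht, List.append_assoc]

-- B's dict: lookup of t ∈ ts gives the per-target scan
theorem pvB_getD (grid : List String) (ts : List String) (t : String) :
    ∀ (d : PySem.Dict String (List (Int × Int))),
      (ts.foldl (fun d t => d.insert t (pvScanB grid t)) d).getD t []
        = if t ∈ ts then pvScanB grid t else d.getD t [] := by
  induction ts with
  | nil => intro d; simp
  | cons a ts ih =>
    intro d
    simp only [List.foldl_cons, ih, List.mem_cons, PySem.Dict.getD_insert]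
    by_cases hts : t ∈ ts
    · simp [hts]
    · by_cases hta : t = a <;> simp [hts, hta]

-- both key lists are the distinct targets in first-occurrence order
theorem pvA_keys (grid : List String) (targets : List String) :
    ((PySem.List.enumerate grid).foldl
      (fun d p =>
        (PySem.List.enumerate p.2.toList).foldl
          (fun d q =>
            if targets.contains (String.mk [q.2]) then
              d.modify (String.mk [q.2]) [] (· ++ [(p.1, q.1)])
            else d) d)
      (targets.foldl (fun d target => d.insert target []) PySem.Dict.empty)).keys
      = PySem.Set.ofList targets := by
  have hk0 : (targets.foldl (fun d target => d.insert target ([] : List (Int × Int))) PySem.Dict.empty).keys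
      = PySem.Set.ofList targets := by
    rw [PySem.Dict.keys_foldl_insert targets (fun _ _ => []) PySem.Dict.empty]
    simp [PySem.Dict.keys_empty, PySem.Set.update_nil_left]
  rw [pvA_outer_keys targets _ _ (fun s hs => ?_), hk0]
  rw [PySem.Dict.contains_iff_mem_keys, hk0, PySem.Set.mem_ofList]
  exact List.contains_iff_mem.mp hs

theorem pvB_keys (grid : List String) (targets : List String) :
    (targets.foldl (fun d t => d.insert t (pvScanB grid t)) PySem.Dict.empty).keys
      = PySem.Set.ofList targets := by
  rw [PySem.Dict.keys_foldl_insert targets (fun _ t => pvScanB grid t) PySem.Dict.empty]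
  simp [PySem.Dict.keys_empty, PySem.Set.update_nil_left]

-- ===== VERDICT (by name: the statement is the Claim_ definition above) =====
theorem find_all_positions_spec : Claim_equal_find_all_positions := by
  intro grid targets _
  unfold Spec_find_all_positions find_all_positions find_all_positions_alt
  simp only []
  set dA := (PySem.List.enumerate grid).foldl
      (fun d p =>
        (PySem.List.enumerate p.2.toList).foldl
          (fun d q =>
            if targets.contains (String.mk [q.2]) then
              d.modify (String.mk [q.2]) [] (· ++ [(p.1, q.1)])
            else d) d)
      (targets.foldl (fun d target => d.insert target []) PySem.Dict.empty) with hdA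
  set dB := targets.foldl (fun d t => d.insert t (pvScanB grid t)) PySem.Dict.empty with hdB
  have hAk : dA.keys = PySem.Set.ofList targets := by rw [hdA]; exact pvA_keys grid targets
  have hBk : dB.keys = PySem.Set.ofList targets := by rw [hdB]; exact pvB_keys grid targets
  have hAnd : dA.keys.Nodup := by rw [hAk]; exact PySem.Set.nodup_ofList targets
  have hBnd : dB.keys.Nodup := by rw [hBk]; exact PySem.Set.nodup_ofList targets
  rw [PySem.Dict.items_eq_map_keys dA hAnd [], PySem.Dict.items_eq_map_keys dB hBnd [], hAk, hBk]
  refine List.map_congr_left (fun k hk => ?_)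
  have hkmem : k ∈ targets := (PySem.Set.mem_ofList _ _).mp hk
  have hkc : targets.contains k = true := List.contains_iff_mem.mpr hkmem
  rw [hdA, pvA_outer_getD targets _ k hkc, pvA_init_getD, hdB, pvB_getD, if_pos hkmem]
  simp [pvScanB]
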